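-- pv_equiv track=rewrite | github.com/tianruochen/simple_ocr | OCR.py | bboxes_combine
-- ===== SOURCE A (Python) =====
-- def bboxes_combine(list_bbox, w):  # 对图像的bboxes进行合并
--     list_bbox_total = []  # 用来装总的list
--     count = 0
--     for l_ in list_bbox:
--         for l in l_:
--             l[1] += count
--             l[3] += count
--             list_bbox_total.append(l)
--         count += w * 2 - 40
--     return list_bbox_total
-- ===== SOURCE B (Python) =====
-- def bboxes_combine(list_bbox, w):
--     # Alternative decomposition: recursively combine the tail first, then shift the
--     # whole already-combined tail down by one step (w*2-40); the head sublist joins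
--     # unshifted. No running accumulator and no per-sublist offset is ever computed.
--     if not list_bbox:
--         return []
--     step = w * 2 - 40
--     rest = bboxes_combine(list_bbox[1:], w)
--     for l in rest:
--         l[1] += step
--         l[3] += step
--     return list_bbox[0] + rest
-- ===== Notes on version B (the rewrite author's own statement) =====
-- stated objective: alternative
-- what changed: Replaces the single accumulator-threading pass with a recursion that combines the tail first and then shifts the entire already-combined tail by one step, so no offset counter or per-sublist offset exists.
import Mathlib
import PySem

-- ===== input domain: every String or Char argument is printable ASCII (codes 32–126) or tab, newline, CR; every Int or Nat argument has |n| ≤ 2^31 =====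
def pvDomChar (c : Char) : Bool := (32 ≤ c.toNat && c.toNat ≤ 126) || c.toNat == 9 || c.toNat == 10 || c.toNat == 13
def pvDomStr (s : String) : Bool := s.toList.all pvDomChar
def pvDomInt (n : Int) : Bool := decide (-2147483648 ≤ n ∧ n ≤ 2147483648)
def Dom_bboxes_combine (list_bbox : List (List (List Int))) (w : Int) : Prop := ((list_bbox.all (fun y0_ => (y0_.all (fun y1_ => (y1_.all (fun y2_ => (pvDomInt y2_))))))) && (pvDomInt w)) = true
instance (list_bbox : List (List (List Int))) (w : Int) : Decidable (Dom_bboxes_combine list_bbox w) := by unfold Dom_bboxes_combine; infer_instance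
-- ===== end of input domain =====

-- B combines the tail recursively and then shifts the whole combined tail by one step,
-- with no offset counter (objective: alternative). Both Pythons mutate the inner bbox
-- lists in place to the same final values; the equivalence proved is about the return value.

-- `l[1] += c; l[3] += c` on an inner bbox, hand-ported (shared helper: both Pythons do
-- exactly this element update); exact for inner lists of length ≥ 4 (Pre_) — on shorter
-- lists Python raises IndexError, which Pre_ excludes.
def pvBump (c : Int) (l : List Int) : List Int :=
  let l1 := l.set 1 (l.getD 1 0 + c)
  l1.set 3 (l1.getD 3 0 + c)

-- ===== PORT A =====
def bboxes_combine (list_bbox : List (List (List Int))) (w : Int) : List (List Int) :=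
  (list_bbox.foldl
    (fun (st : List (List Int) × Int) l_ =>
      (l_.foldl (fun acc l => acc ++ [pvBump st.2 l]) st.1, st.2 + (w * 2 - 40)))
    ([], 0)).1

-- ===== PORT B =====
def bboxes_combine_alt (list_bbox : List (List (List Int))) (w : Int) : List (List Int) :=
  match list_bbox with
  | [] => []
  | head :: tail => head ++ (bboxes_combine_alt tail w).map (pvBump (w * 2 - 40))

-- ===== PRECONDITION & SPEC =====
-- Pre_ excludes exactly the inputs where Python A raises IndexError: an inner bbox with
-- fewer than 4 entries (l[3] is out of range there).
def Pre_bboxes_combine (list_bbox : List (List (List Int))) (w : Int) : Prop :=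
  ∀ l_ ∈ list_bbox, ∀ l ∈ l_, 4 ≤ l.length
instance (list_bbox : List (List (List Int))) (w : Int) : Decidable (Pre_bboxes_combine list_bbox w) := by unfold Pre_bboxes_combine; infer_instance

def pvWitness_bboxes_combine : List (List (List Int)) × Int :=
  ([[[0, 1, 2, 3], [4, 5, 6, 7]], [[8, 9, 10, 11]]], 30)

def Spec_bboxes_combine (list_bbox : List (List (List Int))) (w : Int) (out : List (List Int)) : Prop := out = bboxes_combine_alt list_bbox w
instance (list_bbox : List (List (List Int))) (w : Int) (out : List (List Int)) : Decidable (Spec_bboxes_combine list_bbox w out) := by unfold Spec_bboxes_combine; infer_instance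

-- ===== CLAIM =====
def Claim_equal_bboxes_combine : Prop := ∀ (list_bbox : List (List (List Int))) (w : Int), Dom_bboxes_combine list_bbox w → Pre_bboxes_combine list_bbox w → Spec_bboxes_combine list_bbox w (bboxes_combine list_bbox w)

-- ===== LEMMAS AND PROOFS =====

-- canonical form both ports are reduced to: per-sublist offsets c, c+step, …
def pvOffs (w : Int) : List (List (List Int)) → Int → List (List Int)
  | [], _ => []
  | h :: t, c => h.map (pvBump c) ++ pvOffs w t (c + (w * 2 - 40))

theorem pvBump_zero (l : List Int) (h : 4 ≤ l.length) : pvBump 0 l = l := by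
  match l, h with
  | a :: b :: c :: d :: t, _ => simp [pvBump]

theorem pvBump_comp (c d : Int) (l : List Int) (h : 4 ≤ l.length) :
    pvBump d (pvBump c l) = pvBump (c + d) l := by
  match l, h with
  | a :: b :: c2 :: d2 :: t, _ => simp [pvBump]; constructor <;> ring

-- A's inner append-one-by-one loop builds exactly the mapped sublist.
theorem pv_inner (l_ : List (List Int)) (c : Int) :
    ∀ acc, l_.foldl (fun acc l => acc ++ [pvBump c l]) acc = acc ++ l_.map (pvBump c) := by
  induction l_ with
  | nil => simp
  | cons x xs ih => intro acc; simp [List.foldl, ih]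

-- A's fold from any accumulator and count produces pvOffs.
theorem pv_A (w : Int) (lb : List (List (List Int))) :
    ∀ (acc : List (List Int)) (c : Int),
      (lb.foldl
        (fun (st : List (List Int) × Int) l_ =>
          (l_.foldl (fun acc l => acc ++ [pvBump st.2 l]) st.1, st.2 + (w * 2 - 40)))
        (acc, c)).1
      = acc ++ pvOffs w lb c := by
  induction lb with
  | nil => simp [pvOffs]
  | cons x xs ih =>
    intro acc c
    simp only [List.foldl, pvOffs]
    rw [pv_inner, ih, List.append_assoc]

-- shifting a canonical form by d adds d to every offset.
theorem pv_offs_map (w d : Int) (lb : List (List (List Int)))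
    (hpre : ∀ l_ ∈ lb, ∀ l ∈ l_, 4 ≤ l.length) :
    ∀ c, (pvOffs w lb c).map (pvBump d) = pvOffs w lb (c + d) := by
  induction lb with
  | nil => intro c; simp [pvOffs]
  | cons x xs ih =>
    intro c
    simp only [pvOffs, List.map_append, List.map_map]
    have h1 : x.map (pvBump d ∘ pvBump c) = x.map (pvBump (c + d)) := by
      apply List.map_congr_left
      intro l hl
      exact pvBump_comp c d l (hpre x (by simp) l hl)
    have h2 := ih (fun l_ hl_ l hl => hpre l_ (by simp [hl_]) l hl) (c + (w * 2 - 40))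
    rw [h1, h2]
    have : c + (w * 2 - 40) + d = c + d + (w * 2 - 40) := by ring
    rw [this]

-- B's recursion produces the canonical form with offsets 0, step, 2*step, …
theorem pv_B (w : Int) (lb : List (List (List Int)))
    (hpre : ∀ l_ ∈ lb, ∀ l ∈ l_, 4 ≤ l.length) :
    bboxes_combine_alt lb w = pvOffs w lb 0 := by
  induction lb with
  | nil => simp [bboxes_combine_alt, pvOffs]
  | cons x xs ih =>
    have hx : ∀ l ∈ x, 4 ≤ l.length := hpre x (by simp)
    have hxs : ∀ l_ ∈ xs, ∀ l ∈ l_, 4 ≤ l.length :=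
      fun l_ hl_ l hl => hpre l_ (by simp [hl_]) l hl
    have hhead : x.map (pvBump 0) = x := by
      rw [show x.map (pvBump 0) = x.map id from
            List.map_congr_left (fun l hl => pvBump_zero l (hx l hl)), List.map_id]
    simp only [bboxes_combine_alt, pvOffs, ih hxs,
      pv_offs_map w (w * 2 - 40) xs hxs 0, hhead, zero_add]

-- ===== VERDICT =====
theorem bboxes_combine_spec : Claim_equal_bboxes_combine := by
  intro lb w _ hpre
  unfold Spec_bboxes_combine
  rw [pv_B w lb hpre]
  exact pv_A w lb [] 0
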